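-- pv_equiv track=rewrite | github.com/Nifdi01/CSCI_6511_Nifdi_Guliyev_TILE_PLACEMENT | Layouts.py | getEl
-- ===== SOURCE A (Python) =====
-- def getEl(option):
--     """
--     Returns a list of 16 characters representing the EL layout for the given option.
--     Option 0: indices [4, 12, 8, 0, 1, 2, 3] are '1'
--     Option 1: indices [0, 1, 2, 3, 7, 11, 15] are '1'
--     Option 2: indices [3, 7, 11, 15, 14, 13, 12] are '1'
--     Option 3: indices [15, 14, 13, 12, 8, 4, 0] are '1'
--     All other positions are set to '0'.
--     """
--     elLayout = ['0'] * 16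
--     if option == 0:
--         for i in [4, 12, 8, 0, 1, 2, 3]:
--             elLayout[i] = '1'
--     elif option == 1:
--         for i in [0, 1, 2, 3, 7, 11, 15]:
--             elLayout[i] = '1'
--     elif option == 2:
--         for i in [3, 7, 11, 15, 14, 13, 12]:
--             elLayout[i] = '1'
--     elif option == 3:
--         for i in [15, 14, 13, 12, 8, 4, 0]:
--             elLayout[i] = '1'
--     return elLayout
-- ===== SOURCE B (Python) =====
-- def getEl(option):
--     # The four layouts are L-shapes on the 4x4 grid: an edge row plus an edge
--     # column. Compute each cell from its (row, col) coordinates instead of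
--     # enumerating index lists.
--     if option not in (0, 1, 2, 3):
--         return ['0'] * 16
--     edge_row = 0 if option in (0, 1) else 3
--     edge_col = 0 if option in (0, 3) else 3
--     return ['1' if (i // 4 == edge_row or i % 4 == edge_col) else '0'
--             for i in range(16)]
-- ===== Notes on version B (the rewrite author's own statement) =====
-- stated objective: alternative
-- what changed: Replaces the four hard-coded '1'-index lists mutated into a preallocated list by a geometric characterization: each layout is an L-shape on the 4x4 grid, so B derives an edge row and edge column from the option and computes every cell from its (row, col) coordinates in one pass.
import Mathlib
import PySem

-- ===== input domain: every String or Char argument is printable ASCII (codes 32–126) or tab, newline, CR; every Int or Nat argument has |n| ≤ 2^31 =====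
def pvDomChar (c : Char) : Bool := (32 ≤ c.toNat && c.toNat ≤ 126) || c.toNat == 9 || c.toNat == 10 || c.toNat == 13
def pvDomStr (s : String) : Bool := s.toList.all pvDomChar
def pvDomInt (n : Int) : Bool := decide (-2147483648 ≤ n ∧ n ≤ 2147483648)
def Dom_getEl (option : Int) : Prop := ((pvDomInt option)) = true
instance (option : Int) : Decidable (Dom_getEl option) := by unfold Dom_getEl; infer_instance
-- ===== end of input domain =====

-- B replaces A's hard-coded index lists with a geometric rule: each layout is an
-- L-shape (edge row ∪ edge column) on the 4x4 grid, computed cell by cell (objective: alternative).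

-- ===== PORT A =====
def getEl (option : Int) : List String :=
  let elLayout : List String := List.replicate 16 "0"
  if option = 0 then
    [4, 12, 8, 0, 1, 2, 3].foldl (fun l i => PySem.List.pySetD l i "1") elLayout
  else if option = 1 then
    [0, 1, 2, 3, 7, 11, 15].foldl (fun l i => PySem.List.pySetD l i "1") elLayout
  else if option = 2 then
    [3, 7, 11, 15, 14, 13, 12].foldl (fun l i => PySem.List.pySetD l i "1") elLayout
  else if option = 3 then
    [15, 14, 13, 12, 8, 4, 0].foldl (fun l i => PySem.List.pySetD l i "1") elLayout
  else elLayout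

-- ===== PORT B =====
def getEl_alt (option : Int) : List String :=
  if ¬ ([0, 1, 2, 3] : List Int).contains option then List.replicate 16 "0"
  else
    let edgeRow : Int := if ([0, 1] : List Int).contains option then 0 else 3
    let edgeCol : Int := if ([0, 3] : List Int).contains option then 0 else 3
    (PySem.List.pyRange 0 16 1).map
      (fun i => if PySem.Int.floordiv i 4 = edgeRow ∨ PySem.Int.mod i 4 = edgeCol
                then "1" else "0")

-- ===== PRECONDITION & SPEC =====
def Spec_getEl (option : Int) (out : List String) : Prop := out = getEl_alt option
instance (option : Int) (out : List String) : Decidable (Spec_getEl option out) := by unfold Spec_getEl; infer_instance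

-- ===== CLAIM (what is proved, stated in full; the proofs are below) =====
def Claim_equal_getEl : Prop := ∀ (option : Int), Dom_getEl option → Spec_getEl option (getEl option)

-- ===== LEMMAS AND PROOFS =====

-- ===== VERDICT (by name: the statement is the Claim_ definition above) =====
theorem getEl_spec : Claim_equal_getEl := by
  intro option _
  unfold Spec_getEl
  by_cases h0 : option = 0
  · subst h0; decide
  · by_cases h1 : option = 1
    · subst h1; decide
    · by_cases h2 : option = 2
      · subst h2; decide
      · by_cases h3 : option = 3
        · subst h3; decide
        · unfold getEl getEl_alt
          simp [h0, h1, h2, h3]
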